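-- pv_equiv track=rewrite | github.com/Olive-Roe/tetris-AI | Tetris.py | extended_boardstate_to_boardstate
-- ===== SOURCE A (Python) =====
-- def _get_message_from_garbage_line(line):
--     'Gets the shortened message from a garbage line (e.g. g6 from xxxxxx.xxx, or g2L from xxLxxxxxxx'
--     index = 0
--     # Default piece type is ., which isn't shown
--     piece_type = ""
--     for i, cell in enumerate(line):
--         if cell != "x":
--             # Finds the non garbage cell
--             index = i
--             if cell != ".":
--                 # Sets the piece type to the contents of the cell
--                 piece_type = cell
--             break
--     return f"g{str(index)}{piece_type}"
--
-- def _get_message_from_normal_line(line):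
--     lineStr = ""
--     counter = 0
--     for c in line:
--         if c == ".":
--             counter += 1
--         else:
--             lineStr += str(counter) + c if counter != 0 else c
--             counter = 0
--     # Add the counter one last time if it is still not 0
--     lineStr += str(counter) if counter != 0 else ""
--     return lineStr
--
-- def extended_boardstate_to_boardstate(extended_boardstate: str):
--     # TODO: Short-circuit this function to run faster even if there are more pieces
--     if extended_boardstate == '*' + ("........../"*40)[:-1]:
--         return "*"
--     # Remove asterisk
--     extended_boardstate = extended_boardstate[1:]
--     outputList = []
--     # Look at list in reverse order to remove unnecessary empty lines
--     emptyRows = True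
--     for line in extended_boardstate.split("/")[::-1]:
--         if line == "..........":
--             if emptyRows:
--                 # Skip the empty row
--                 continue
--             outputList.append("")
--         else:
--             emptyRows = False
--             # The rows up until now are empty, now we have some non-empty rows
--             if "x" in line:
--                 outputList.append(_get_message_from_garbage_line(line))
--             else:
--                 outputList.append(_get_message_from_normal_line(line))
--     # Un-reverse the list to get the correct order
--     return "*" + "/".join(outputList[::-1])
-- ===== SOURCE B (Python) =====
-- def _encode_garbage(line):
--     for i, c in enumerate(line):
--         if c != "x":
--             return "g" + str(i) + (c if c != "." else "")
--     return "g0"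
--
-- def _encode_normal(line):
--     out = []
--     i = 0
--     n = len(line)
--     while i < n:
--         if line[i] == ".":
--             j = i
--             while j < n and line[j] == ".":
--                 j += 1
--             out.append(str(j - i))
--             i = j
--         else:
--             out.append(line[i])
--             i += 1
--     return "".join(out)
--
-- def _encode_line(line):
--     if line == "..........":
--         return ""
--     if "x" in line:
--         return _encode_garbage(line)
--     return _encode_normal(line)
--
-- def extended_boardstate_to_boardstate(extended_boardstate: str):
--     rows = extended_boardstate[1:].split("/")
--     while rows and rows[-1] == "..........":
--         rows.pop()
--     return "*" + "/".join(_encode_line(r) for r in rows)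
-- ===== Notes on version B (the rewrite author's own statement) =====
-- stated objective: simpler
-- what changed: Replaces the reverse-iterate-with-flag trimming and double reversal by a forward trailing-pop trim plus one per-line encoder, and replaces the dot-counter accumulator in the normal-line encoder by index-based run grouping; the hard-coded all-empty-board special case disappears because the trim subsumes it.
import Mathlib
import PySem

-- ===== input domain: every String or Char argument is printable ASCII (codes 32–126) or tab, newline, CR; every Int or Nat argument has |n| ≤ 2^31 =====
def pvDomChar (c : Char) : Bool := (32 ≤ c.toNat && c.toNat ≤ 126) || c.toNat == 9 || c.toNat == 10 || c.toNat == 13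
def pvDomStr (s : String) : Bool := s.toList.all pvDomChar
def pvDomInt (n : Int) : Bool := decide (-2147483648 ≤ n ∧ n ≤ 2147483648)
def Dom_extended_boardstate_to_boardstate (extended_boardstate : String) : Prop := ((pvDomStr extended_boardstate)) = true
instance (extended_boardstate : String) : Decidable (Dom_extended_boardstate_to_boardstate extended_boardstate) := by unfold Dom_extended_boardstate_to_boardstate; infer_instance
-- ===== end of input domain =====

-- B replaces A's reverse-iterate-with-flag trimming + double reversal by a forward trailing trim
-- plus one per-line encoder (with an index/run-based normal-line encoder), dropping A's hard-coded
-- all-empty-board special case; objective: simpler.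

-- the empty row literal ".........."
def pvE : List Char := "..........".toList

-- ===== PORT A =====
-- '*' + ("........../"*40)[:-1]
def pvSpecialChars : List Char :=
  '*' :: PySem.List.slice (List.flatten (List.replicate 40 "........../".toList)) none (some (-1))

-- _get_message_from_garbage_line's for-loop with break: state (index, piece_type)
def pvAGarbLoop : List (Int × Char) → Int × List Char → Int × List Char
  | [], st => st
  | (i, c) :: rest, st =>
    if c ≠ 'x' then (i, if c ≠ '.' then [c] else []) else pvAGarbLoop rest st

def pvAGarb (line : List Char) : List Char :=
  let st := pvAGarbLoop (PySem.List.enumerate line 0) (0, [])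
  'g' :: (PySem.Int.toChars st.1 ++ st.2)

-- _get_message_from_normal_line's loop (state: lineStr, counter), with the final counter append
def pvANormLoop : List Char → List Char → Int → List Char
  | [], acc, k => acc ++ (if k ≠ 0 then PySem.Int.toChars k else [])
  | c :: cs, acc, k =>
    if c = '.' then pvANormLoop cs acc (k + 1)
    else pvANormLoop cs (acc ++ (if k ≠ 0 then PySem.Int.toChars k ++ [c] else [c])) 0

def pvANorm (line : List Char) : List Char := pvANormLoop line [] 0

-- the main for-loop over the reversed row list; state (emptyRows, outputList)
def pvALoop : List (List Char) → Bool → List (List Char) → Bool × List (List Char)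
  | [], e, out => (e, out)
  | l :: rest, e, out =>
    if l = pvE then
      (if e then pvALoop rest e out else pvALoop rest e (out ++ [[]]))
    else
      if PySem.Chars.isIn ['x'] l then pvALoop rest false (out ++ [pvAGarb l])
      else pvALoop rest false (out ++ [pvANorm l])

def extended_boardstate_to_boardstate (extended_boardstate : String) : String :=
  if extended_boardstate.toList = pvSpecialChars then "*"
  else
    -- extended_boardstate[1:], then split("/")[::-1]  (xs[::-1] = reverse, PySem.List.slice?_none_none_neg_one)
    String.ofList ('*' :: PySem.Chars.join ['/']
      (pvALoop (PySem.Chars.splitOn (PySem.List.slice extended_boardstate.toList (some 1) none) ['/']).reverse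
        true []).2.reverse)

-- ===== PORT B =====
-- _encode_garbage: enumerate with early return, i the running index
def pvBGarb : Int → List Char → List Char
  | _, [] => ['g', '0']
  | i, c :: cs =>
    if c ≠ 'x' then 'g' :: (PySem.Int.toChars i ++ (if c ≠ '.' then [c] else []))
    else pvBGarb (i + 1) cs

-- _encode_normal: outer index loop / inner run-scanning while (k = j - i so far)
mutual
def pvBNorm : List Char → List Char
  | [] => []
  | c :: cs => if c = '.' then pvBDots 1 cs else c :: pvBNorm cs
termination_by l => l.length
def pvBDots : Int → List Char → List Char
  | k, [] => PySem.Int.toChars k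
  | k, c :: cs => if c = '.' then pvBDots (k + 1) cs else PySem.Int.toChars k ++ c :: pvBNorm cs
termination_by _ l => l.length
end

-- _encode_line
def pvBLine (l : List Char) : List Char :=
  if l = pvE then []
  else if PySem.Chars.isIn ['x'] l then pvBGarb 0 l
  else pvBNorm l

-- while rows and rows[-1] == "..........": rows.pop()
def pvTrim (rows : List (List Char)) : List (List Char) :=
  if h : rows ≠ [] ∧ rows.getLast? = some pvE then pvTrim rows.dropLast else rows
termination_by rows.length
decreasing_by
  simp only [List.length_dropLast]
  have := List.length_pos_iff.mpr h.1
  omega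

def extended_boardstate_to_boardstate_alt (extended_boardstate : String) : String :=
  String.ofList ('*' :: PySem.Chars.join ['/']
    ((pvTrim (PySem.Chars.splitOn (PySem.List.slice extended_boardstate.toList (some 1) none) ['/'])).map pvBLine))

-- ===== PRECONDITION & SPEC =====
def Spec_extended_boardstate_to_boardstate (extended_boardstate : String) (out : String) : Prop := out = extended_boardstate_to_boardstate_alt extended_boardstate
instance (extended_boardstate : String) (out : String) : Decidable (Spec_extended_boardstate_to_boardstate extended_boardstate out) := by unfold Spec_extended_boardstate_to_boardstate; infer_instance

-- ===== CLAIM (what is proved, stated in full; the proofs are below) =====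
def Claim_equal_extended_boardstate_to_boardstate : Prop := ∀ (extended_boardstate : String), Dom_extended_boardstate_to_boardstate extended_boardstate → Spec_extended_boardstate_to_boardstate extended_boardstate (extended_boardstate_to_boardstate extended_boardstate)

-- ===== LEMMAS AND PROOFS =====

-- the garbage-line encoders agree (for any enumerate start i)
theorem pv_garb_eq (l : List Char) (i : Int) :
    'g' :: (PySem.Int.toChars (pvAGarbLoop (PySem.List.enumerate l i) (0, [])).1
      ++ (pvAGarbLoop (PySem.List.enumerate l i) (0, [])).2) = pvBGarb i l := by
  induction l generalizing i with
  | nil =>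
    simp only [PySem.List.enumerate, pvAGarbLoop, pvBGarb]
    decide
  | cons c cs ih =>
    simp only [PySem.List.enumerate_cons, pvAGarbLoop, pvBGarb]
    by_cases hc : c = 'x'
    · simp [hc, ih]
    · simp [hc]

theorem pv_norm_eq (l : List Char) (acc : List Char) (k : Int) (hk : 0 ≤ k) :
    pvANormLoop l acc k = acc ++ (if k = 0 then pvBNorm l else pvBDots k l) := by
  induction l generalizing acc k with
  | nil =>
    by_cases h : k = 0 <;> simp [pvANormLoop, pvBNorm, pvBDots, h]
  | cons c cs ih =>
    by_cases hc : c = '.'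
    · have h1 : (0:Int) ≤ k + 1 := by omega
      have h2 : k + 1 ≠ 0 := by omega
      simp only [pvANormLoop, hc, ite_true]
      rw [ih acc (k + 1) h1]
      by_cases h : k = 0
      · simp [h, pvBNorm]
      · simp [h, h2, pvBDots]
    · simp only [pvANormLoop, hc, ite_false]
      rw [ih _ 0 le_rfl]
      by_cases h : k = 0
      · simp [h, pvBNorm, hc]
      · simp [h, pvBDots, hc]

-- per-line agreement (on non-empty-row lines A picks the same encoder B's _encode_line picks)
theorem pv_line_eq (l : List Char) (hl : ¬ l = pvE) :
    (if PySem.Chars.isIn ['x'] l then pvAGarb l else pvANorm l) = pvBLine l := by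
  unfold pvBLine pvAGarb pvANorm
  rw [if_neg hl]
  by_cases hx : PySem.Chars.isIn ['x'] l
  · simp only [hx, ite_true]
    exact pv_garb_eq l 0
  · simp only [hx]
    simpa using pv_norm_eq l [] 0 le_rfl

-- A's main loop once the flag is false just maps the per-line encoder
theorem pv_loopF (xs : List (List Char)) (out : List (List Char)) :
    (pvALoop xs false out).2 = out ++ xs.map pvBLine := by
  induction xs generalizing out with
  | nil => simp [pvALoop]
  | cons l rest ih =>
    by_cases hl : l = pvE
    · simp [pvALoop, hl, ih, pvBLine]
    · by_cases hx : PySem.Chars.isIn ['x'] l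
      · have hline : pvAGarb l = pvBLine l := by rw [← pv_line_eq l hl, if_pos hx]
        simp [pvALoop, hl, hx, ih, hline]
      · have hline : pvANorm l = pvBLine l := by rw [← pv_line_eq l hl, if_neg hx]
        simp [pvALoop, hl, hx, ih, hline]

-- A's main loop from the initial flag drops the leading ".........." rows (of the reversed list)
theorem pv_loopT (xs : List (List Char)) :
    (pvALoop xs true []).2 = (xs.dropWhile (fun l => decide (l = pvE))).map pvBLine := by
  induction xs with
  | nil => simp [pvALoop]
  | cons l rest ih =>
    by_cases hl : l = pvE
    · simp [pvALoop, hl, ih]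
    · by_cases hx : PySem.Chars.isIn ['x'] l
      · have hline : pvAGarb l = pvBLine l := by rw [← pv_line_eq l hl, if_pos hx]
        simp [pvALoop, hl, hx, pv_loopF, hline]
      · have hline : pvANorm l = pvBLine l := by rw [← pv_line_eq l hl, if_neg hx]
        simp [pvALoop, hl, hx, pv_loopF, hline]

-- B's trailing trim = reverse ∘ dropWhile-empty ∘ reverse
theorem pv_trim_eq (rows : List (List Char)) :
    pvTrim rows = ((rows.reverse.dropWhile (fun l => decide (l = pvE))).reverse) := by
  induction rows using List.reverseRecOn with
  | nil => rw [pvTrim]; simp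
  | append_singleton ys y ih =>
    rw [pvTrim]
    by_cases hy : y = pvE
    · simp [hy, ih]
    · simp [hy]

-- ===== VERDICT (by name: the statement is the Claim_ definition above) =====
set_option maxRecDepth 100000 in
theorem extended_boardstate_to_boardstate_spec : Claim_equal_extended_boardstate_to_boardstate := by
  intro s _
  unfold Spec_extended_boardstate_to_boardstate
  by_cases h : s.toList = pvSpecialChars
  · unfold extended_boardstate_to_boardstate extended_boardstate_to_boardstate_alt
    rw [if_pos h, h, pv_trim_eq]
    decide
  · unfold extended_boardstate_to_boardstate extended_boardstate_to_boardstate_alt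
    rw [if_neg h, pv_trim_eq, List.map_reverse, ← pv_loopT]
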